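-- pv_equiv track=rewrite | github.com/StCarmen/PRICE | setup/features_generate.py | lower_except_quotes
-- ===== SOURCE A (Python) =====
-- def lower_except_quotes(s):
--     inside_quote = False
--     quote_char = ''
--     result = []
--
--     for char in s:
--         if char in "'\"" and (not inside_quote or quote_char == char):
--             inside_quote = not inside_quote
--             quote_char = '' if inside_quote == False else char
--         if not inside_quote:
--             result.append(char.lower())
--         else:
--             result.append(char)
--
--     return ''.join(result)
-- ===== SOURCE B (Python) =====
-- def lower_except_quotes(s):
--     res = []
--     rest = s
--     while rest:
--         q = 0
--         while q < len(rest) and rest[q] not in "'\"":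
--             q += 1
--         res.append(rest[:q].lower())
--         if q == len(rest):
--             break
--         quote = rest[q]
--         tail = rest[q + 1:]
--         end = tail.find(quote)
--         if end < 0:
--             res.append(rest[q:])
--             break
--         res.append(quote + tail[:end + 1])
--         rest = tail[end + 1:]
--     return ''.join(res)
-- ===== Notes on version B (the rewrite author's own statement) =====
-- stated objective: alternative
-- what changed: Replaced A's per-character quote-state machine (inside_quote/quote_char toggling on every char) by a chunked boundary scan: repeatedly split off the quote-free prefix, lowercase it as a slice, then find the matching same quote and copy the quoted chunk verbatim.
import Mathlib
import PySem

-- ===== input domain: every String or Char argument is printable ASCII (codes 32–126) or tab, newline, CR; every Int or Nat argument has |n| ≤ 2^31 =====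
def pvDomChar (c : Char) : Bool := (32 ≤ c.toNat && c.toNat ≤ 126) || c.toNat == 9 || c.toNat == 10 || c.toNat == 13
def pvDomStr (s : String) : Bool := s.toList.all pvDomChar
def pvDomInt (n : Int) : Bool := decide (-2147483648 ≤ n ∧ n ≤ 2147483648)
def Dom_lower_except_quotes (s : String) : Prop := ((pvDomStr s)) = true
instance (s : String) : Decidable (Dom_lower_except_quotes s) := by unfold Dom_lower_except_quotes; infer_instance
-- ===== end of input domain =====

-- B replaces A's per-character quote-state machine by a chunked scan (unquoted span,
-- then the matching quote), a different decomposition of the same task (objective: alternative).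

-- ===== PORT A =====
-- A's loop: state (inside_quote, quote_char, result); quote_char is a Python str,
-- carried here as a List Char ([] for '', [c] for the one-char string).
def pvLowerA_go (inside : Bool) (qc : List Char) : List Char → List Char
  | [] => []
  | c :: rest =>
    let cond := (c == '\'' || c == '"') && (!inside || qc == [c])
    let inside' := if cond then !inside else inside
    let qc' := if cond then (if inside' == false then [] else [c]) else qc
    (if !inside' then PySem.Chars.lowerChar c else c) :: pvLowerA_go inside' qc' rest

def lower_except_quotes (s : String) : String := String.mk (pvLowerA_go false [] s.toList)

-- ===== PORT B =====
def pvIsQuote (c : Char) : Bool := c == '\'' || c == '"'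

-- Source B's outer while-loop; the inner index scan for the first quote is the
-- takeWhile/dropWhile split, tail.find(quote) is the split of tail at the first quote.
def pvLowerB_go (rest : List Char) : List Char :=
  if rest = [] then [] else
    let pre := rest.takeWhile (fun c => !pvIsQuote c)
    match hr : rest.dropWhile (fun c => !pvIsQuote c) with
    | [] => PySem.Chars.lower pre                          -- q == len(rest): no quote left
    | quote :: tail =>
      match ha : tail.dropWhile (fun c => !(c == quote)) with
      | [] => PySem.Chars.lower pre ++ quote :: tail       -- end < 0: unmatched quote, keep tail
      | _ :: rest2 =>
        PySem.Chars.lower pre ++ (quote :: (tail.takeWhile (fun c => !(c == quote)) ++ [quote])) ++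
          pvLowerB_go rest2
termination_by rest.length
decreasing_by
  have h1 : (rest.dropWhile (fun c => !pvIsQuote c)).length ≤ rest.length :=
    List.length_dropWhile_le _ _
  have h2 : (tail.dropWhile (fun c => !(c == quote))).length ≤ tail.length :=
    List.length_dropWhile_le _ _
  rw [hr] at h1; rw [ha] at h2
  simp at h1 h2; omega

def lower_except_quotes_alt (s : String) : String := String.mk (pvLowerB_go s.toList)

-- ===== PRECONDITION & SPEC =====
def Spec_lower_except_quotes (s : String) (out : String) : Prop := out = lower_except_quotes_alt s
instance (s : String) (out : String) : Decidable (Spec_lower_except_quotes s out) := by unfold Spec_lower_except_quotes; infer_instance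

-- ===== CLAIM (what is proved, stated in full; the proofs are below) =====
def Claim_equal_lower_except_quotes : Prop := ∀ (s : String), Dom_lower_except_quotes s → Spec_lower_except_quotes s (lower_except_quotes s)

-- ===== LEMMAS AND PROOFS =====

-- Outside quotes, A lowercases a quote-free prefix and keeps scanning.
theorem pvA_outside (l x : List Char) (h : ∀ c ∈ l, pvIsQuote c = false) :
    pvLowerA_go false [] (l ++ x) = l.map PySem.Chars.lowerChar ++ pvLowerA_go false [] x := by
  induction l with
  | nil => simp
  | cons c t ih =>
    have hc : pvIsQuote c = false := h c (List.mem_cons_self)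
    simp only [pvIsQuote] at hc
    simp [pvLowerA_go, hc, ih (fun d hd => h d (List.mem_cons_of_mem _ hd))]

-- Inside a quote opened by q, A copies characters other than q verbatim.
theorem pvA_inside (q : Char) (l x : List Char) (h : ∀ c ∈ l, c ≠ q) :
    pvLowerA_go true [q] (l ++ x) = l ++ pvLowerA_go true [q] x := by
  induction l with
  | nil => simp
  | cons c t ih =>
    have hc : c ≠ q := h c (List.mem_cons_self)
    have hqc : ([q] == [c]) = false := by
      simp
      exact fun hh => hc hh.symm
    simp [pvLowerA_go, hqc, ih (fun d hd => h d (List.mem_cons_of_mem _ hd))]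

-- A lowercase-fixes both quote characters.
theorem pvA_close (q : Char) (hq : pvIsQuote q = true) (x : List Char) :
    pvLowerA_go true [q] (q :: x) = q :: pvLowerA_go false [] x := by
  simp only [pvIsQuote, Bool.or_eq_true, beq_iff_eq] at hq
  rcases hq with h | h <;> subst h <;> simp [pvLowerA_go] <;> decide

theorem pvA_open (q : Char) (hq : pvIsQuote q = true) (x : List Char) :
    pvLowerA_go false [] (q :: x) = q :: pvLowerA_go true [q] x := by
  simp only [pvIsQuote, Bool.or_eq_true, beq_iff_eq] at hq
  rcases hq with h | h <;> subst h <;> simp [pvLowerA_go]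

-- Main equivalence on character lists, by strong induction on the length.
theorem pvAB_len : ∀ (n : Nat) (l : List Char), l.length ≤ n →
    pvLowerA_go false [] l = pvLowerB_go l := by
  intro n
  induction n with
  | zero =>
    intro l hl
    have : l = [] := List.eq_nil_of_length_eq_zero (Nat.le_zero.mp hl)
    subst this
    simp [pvLowerB_go, pvLowerA_go]
  | succ n ih =>
    intro l hl
    by_cases hne : l = []
    · subst hne; simp [pvLowerB_go, pvLowerA_go]
    · have hsplit : l.takeWhile (fun c => !pvIsQuote c) ++ l.dropWhile (fun c => !pvIsQuote c) = l :=
        List.takeWhile_append_dropWhile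
      have hpre : ∀ c ∈ l.takeWhile (fun c => !pvIsQuote c), pvIsQuote c = false := by
        intro c hc
        have := List.mem_takeWhile_imp hc
        simpa using this
      cases hsuf : l.dropWhile (fun c => !pvIsQuote c) with
      | nil =>
        rw [pvLowerB_go]
        rw [if_neg hne]
        split
        next heq =>
          conv_lhs => rw [← hsplit, hsuf]
          rw [pvA_outside _ _ hpre]
          simp [pvLowerA_go, PySem.Chars.lower]
        next quote tail heq => rw [hsuf] at heq; exact absurd heq (by simp)
      | cons quote tail =>
        have hq : pvIsQuote quote = true := by
          have hnn : l.dropWhile (fun c => !pvIsQuote c) ≠ [] := by rw [hsuf]; simp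
          have := List.head_dropWhile_not (fun c => !pvIsQuote c) hnn
          rw [hsuf] at hnn
          have hh : (l.dropWhile (fun c => !pvIsQuote c)).head ‹_› = quote := by
            simp [hsuf]
          rw [hh] at this
          simpa using this
        have hbody : ∀ c ∈ tail.takeWhile (fun c => !(c == quote)), c ≠ quote := by
          intro c hc
          have := List.mem_takeWhile_imp hc
          simpa using this
        have htail : tail.takeWhile (fun c => !(c == quote)) ++
            tail.dropWhile (fun c => !(c == quote)) = tail :=
          List.takeWhile_append_dropWhile
        rw [pvLowerB_go]
        rw [if_neg hne]
        split
        next heq => rw [hsuf] at heq; exact absurd heq (by simp)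
        next quote' tail' heq =>
          rw [hsuf] at heq
          injection heq with hq1 hq2
          subst hq1; subst hq2
          split
          next hafter =>
            have htl2 : tail.takeWhile (fun c => !(c == quote)) ++ ([] : List Char) = tail := by
              conv_rhs => rw [← htail]
              rw [hafter]
            conv_lhs => rw [← hsplit, hsuf]
            rw [pvA_outside _ _ hpre, pvA_open quote hq]
            conv_lhs => rw [← htl2]
            rw [pvA_inside quote _ [] hbody]
            simp [pvLowerA_go, PySem.Chars.lower, htl2]
          next c2 rest2 hafter =>
            have hc2 : c2 = quote := by
              have hnn : tail.dropWhile (fun c => !(c == quote)) ≠ [] := by rw [hafter]; simp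
              have := List.head_dropWhile_not (fun c => !(c == quote)) hnn
              have hh : (tail.dropWhile (fun c => !(c == quote))).head hnn = c2 := by
                simp [hafter]
              rw [hh] at this
              simpa using this
            subst hc2
            have htl2 : tail.takeWhile (fun c => !(c == c2)) ++ c2 :: rest2 = tail := by
              conv_rhs => rw [← htail]
              rw [hafter]
            have hlen : rest2.length ≤ n := by
              have h1 := congrArg List.length hsplit
              rw [hsuf] at h1
              have h2 := congrArg List.length htl2
              simp at h1 h2
              omega
            conv_lhs => rw [← hsplit, hsuf]
            rw [pvA_outside _ _ hpre, pvA_open c2 hq]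
            conv_lhs => rw [← htl2]
            rw [pvA_inside c2 _ _ hbody, pvA_close c2 hq]
            rw [ih rest2 hlen]
            simp [PySem.Chars.lower]

theorem pvAB_eq (l : List Char) : pvLowerA_go false [] l = pvLowerB_go l :=
  pvAB_len l.length l (Nat.le_refl _)

-- ===== VERDICT (by name: the statement is the Claim_ definition above) =====
theorem lower_except_quotes_spec : Claim_equal_lower_except_quotes := by
  intro s _
  unfold Spec_lower_except_quotes lower_except_quotes lower_except_quotes_alt
  rw [pvAB_eq]
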